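-- pv_equiv track=rewrite | github.com/T00few2/dcu-member-liga | backend/services/category_engine.py | _effective_cat_name
-- ===== SOURCE A (Python) =====
-- from typing import Optional
--
-- ZR_CATEGORIES: list[tuple[str, int, Optional[int]]] = [
--     ('Diamond', 2200, None),
--     ('Ruby',    1900, 2200),
--     ('Emerald', 1650, 1900),
--     ('Sapphire', 1450, 1650),
--     ('Amethyst', 1300, 1450),
--     ('Platinum', 1150, 1300),
--     ('Gold',    1000, 1150),
--     ('Silver',   850, 1000),
--     ('Bronze',   650,  850),
--     ('Copper',     0,  650),
-- ]
--
-- CategoryList = list[tuple[str, int, Optional[int]]]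
--
-- def _effective_cat_name(
--     auto_cat: str | None,
--     sel_cat: str | None,
--     categories: CategoryList | None = None,
-- ) -> str | None:
--     """
--     Return the higher-ranked (harder) category between auto-assigned and self-selected.
--
--     Lower index in the categories list = higher/harder category.
--     Names not found in the list are treated as rank -1 (highest priority), so
--     custom-named merged categories always take precedence over standard names.
--     """
--     if not auto_cat:
--         return sel_cat
--     if not sel_cat:
--         return auto_cat
--     cats = categories or ZR_CATEGORIES
--     cat_names = [n for n, _, _ in cats]
--
--     def rank(name: str) -> int:
--         try:
--             return cat_names.index(name)
--         except ValueError: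
--             return -1  # unknown / custom name → treat as highest
--
--     return auto_cat if rank(auto_cat) <= rank(sel_cat) else sel_cat
-- ===== SOURCE B (Python) =====
-- from typing import Optional
--
-- ZR_CATEGORIES: list[tuple[str, int, Optional[int]]] = [
--     ('Diamond', 2200, None),
--     ('Ruby',    1900, 2200),
--     ('Emerald', 1650, 1900),
--     ('Sapphire', 1450, 1650),
--     ('Amethyst', 1300, 1450),
--     ('Platinum', 1150, 1300),
--     ('Gold',    1000, 1150),
--     ('Silver',   850, 1000),
--     ('Bronze',   650,  850),
--     ('Copper',     0,  650),
-- ]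
--
-- CategoryList = list[tuple[str, int, Optional[int]]]
--
-- def _effective_cat_name(
--     auto_cat: str | None,
--     sel_cat: str | None,
--     categories: CategoryList | None = None,
-- ) -> str | None:
--     if not auto_cat:
--         return sel_cat
--     if not sel_cat:
--         return auto_cat
--     cats = categories or ZR_CATEGORIES
--     names = {n for n, _, _ in cats}
--     if auto_cat not in names:
--         return auto_cat          # unknown / custom name wins
--     if sel_cat not in names:
--         return sel_cat
--     for n, _, _ in cats:         # earlier (higher-ranked) entry wins; tie returns the shared name
--         if n == auto_cat or n == sel_cat:
--             return n
-- ===== Notes on version B (the rewrite author's own statement) =====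
-- stated objective: alternative
-- what changed: Replaces the two list.index rank computations and the numeric rank comparison with explicit unknown-name handling via a set of names followed by a single ordered scan that returns the first entry matching either name.
import Mathlib
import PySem

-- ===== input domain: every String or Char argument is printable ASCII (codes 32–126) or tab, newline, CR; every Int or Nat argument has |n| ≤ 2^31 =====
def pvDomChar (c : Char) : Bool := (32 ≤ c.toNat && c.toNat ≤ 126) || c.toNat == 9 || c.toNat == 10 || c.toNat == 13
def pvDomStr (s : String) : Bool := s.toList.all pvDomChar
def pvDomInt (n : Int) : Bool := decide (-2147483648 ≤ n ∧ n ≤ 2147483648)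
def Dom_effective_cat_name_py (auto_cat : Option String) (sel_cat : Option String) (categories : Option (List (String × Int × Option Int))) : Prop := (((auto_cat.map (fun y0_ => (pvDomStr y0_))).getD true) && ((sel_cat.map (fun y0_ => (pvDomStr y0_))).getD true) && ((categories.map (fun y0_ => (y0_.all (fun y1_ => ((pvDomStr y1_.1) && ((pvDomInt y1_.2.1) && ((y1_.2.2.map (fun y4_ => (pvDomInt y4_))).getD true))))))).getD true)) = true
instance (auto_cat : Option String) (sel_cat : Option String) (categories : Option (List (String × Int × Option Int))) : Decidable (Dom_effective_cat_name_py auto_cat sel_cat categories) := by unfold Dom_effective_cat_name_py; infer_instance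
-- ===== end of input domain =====

-- B replaces A's two list.index rank computations and numeric comparison with explicit
-- unknown-name handling plus one ordered scan returning the first matching entry (objective: alternative).

def pvZR : List (String × Int × Option Int) :=
  [("Diamond", 2200, none), ("Ruby", 1900, some 2200), ("Emerald", 1650, some 1900),
   ("Sapphire", 1450, some 1650), ("Amethyst", 1300, some 1450), ("Platinum", 1150, some 1300),
   ("Gold", 1000, some 1150), ("Silver", 850, some 1000), ("Bronze", 650, some 850),
   ("Copper", 0, some 650)]

-- 'categories or ZR_CATEGORIES': None or the empty list falls back to the default table
def pvCats (categories : Option (List (String × Int × Option Int))) : List (String × Int × Option Int) :=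
  match categories with
  | none => pvZR
  | some l => if l = [] then pvZR else l

-- ===== PORT A =====
-- rank(name): cat_names.index(name), ValueError → -1
def pvRank (cat_names : List String) (name : String) : Int :=
  match PySem.List.index? cat_names name with
  | some k => (k : Int)
  | none => -1

def effective_cat_name_py (auto_cat : Option String) (sel_cat : Option String) (categories : Option (List (String × Int × Option Int))) : Option String :=
  if auto_cat.getD "" = "" then sel_cat
  else if sel_cat.getD "" = "" then auto_cat
  else
    let cats := pvCats categories
    let cat_names := cats.map (fun p => p.1)
    if pvRank cat_names (auto_cat.getD "") ≤ pvRank cat_names (sel_cat.getD "") then auto_cat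
    else sel_cat

-- ===== PORT B =====
-- the ordered scan: first entry whose name equals auto or sel
def pvScanFirst (a s : String) : List (String × Int × Option Int) → Option String
  | [] => none
  | (n, _, _) :: rest => if n = a ∨ n = s then some n else pvScanFirst a s rest

def effective_cat_name_py_alt (auto_cat : Option String) (sel_cat : Option String) (categories : Option (List (String × Int × Option Int))) : Option String :=
  if auto_cat.getD "" = "" then sel_cat
  else if sel_cat.getD "" = "" then auto_cat
  else
    let cats := pvCats categories
    let names : PySem.Set String := PySem.Set.ofList (cats.map (fun p => p.1))
    let a := auto_cat.getD ""
    let s := sel_cat.getD ""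
    if ¬ (a ∈ names) then auto_cat
    else if ¬ (s ∈ names) then sel_cat
    else pvScanFirst a s cats

-- ===== PRECONDITION & SPEC =====
def Spec_effective_cat_name_py (auto_cat : Option String) (sel_cat : Option String) (categories : Option (List (String × Int × Option Int))) (out : Option String) : Prop := out = effective_cat_name_py_alt auto_cat sel_cat categories
instance (auto_cat : Option String) (sel_cat : Option String) (categories : Option (List (String × Int × Option Int))) (out : Option String) : Decidable (Spec_effective_cat_name_py auto_cat sel_cat categories out) := by unfold Spec_effective_cat_name_py; infer_instance

-- ===== CLAIM (what is proved, stated in full; the proofs are below) =====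
def Claim_equal_effective_cat_name_py : Prop := ∀ (auto_cat : Option String) (sel_cat : Option String) (categories : Option (List (String × Int × Option Int))), Dom_effective_cat_name_py auto_cat sel_cat categories → Spec_effective_cat_name_py auto_cat sel_cat categories (effective_cat_name_py auto_cat sel_cat categories)

-- ===== LEMMAS AND PROOFS =====

theorem pvRank_neg_iff (ns : List String) (x : String) : pvRank ns x = -1 ↔ x ∉ ns := by
  unfold pvRank
  cases h : PySem.List.index? ns x with
  | none => simp [(PySem.List.index?_eq_none_iff ns x).mp h]
  | some k =>
    have hx : x ∈ ns := (PySem.List.index?_isSome_iff ns x).mp (by rw [h]; rfl)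
    simp [hx]

theorem pvRank_nonneg_iff (ns : List String) (x : String) : 0 ≤ pvRank ns x ↔ x ∈ ns := by
  unfold pvRank
  cases h : PySem.List.index? ns x with
  | none => simp [(PySem.List.index?_eq_none_iff ns x).mp h]
  | some k =>
    have hx : x ∈ ns := (PySem.List.index?_isSome_iff ns x).mp (by rw [h]; rfl)
    simp [hx]

theorem pvRank_cons_self (n : String) (tl : List String) : pvRank (n :: tl) n = 0 := by
  unfold pvRank
  rw [PySem.List.index?_cons_self]
  simp

theorem pvRank_cons_ne (n x : String) (tl : List String) (h : n ≠ x) (hx : x ∈ tl) :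
    pvRank (n :: tl) x = pvRank tl x + 1 := by
  unfold pvRank
  rw [PySem.List.index?_cons_of_ne tl h]
  cases hh : PySem.List.index? tl x with
  | none => exact absurd ((PySem.List.index?_eq_none_iff tl x).mp hh) (by simp [hx])
  | some k => simp

-- core: when both names occur, the ordered scan is A's rank comparison
theorem scan_eq_rank (a s : String) :
    ∀ (cats : List (String × Int × Option Int)),
      a ∈ cats.map (fun p => p.1) → s ∈ cats.map (fun p => p.1) →
      pvScanFirst a s cats =
        (if pvRank (cats.map (fun p => p.1)) a ≤ pvRank (cats.map (fun p => p.1)) s then some a else some s) := by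
  intro cats
  induction cats with
  | nil => simp
  | cons hd tl ih =>
    obtain ⟨n, r, u⟩ := hd
    intro ha hs
    simp only [List.map_cons] at ha hs ⊢
    by_cases hna : n = a
    · subst hna
      have h0 : pvRank (n :: tl.map (fun p => p.1)) n = 0 := pvRank_cons_self _ _
      have hs' : 0 ≤ pvRank (n :: tl.map (fun p => p.1)) s :=
        (pvRank_nonneg_iff _ _).mpr hs
      simp [pvScanFirst, h0, hs']
    · by_cases hns : n = s
      · subst hns
        have h0 : pvRank (n :: tl.map (fun p => p.1)) n = 0 := pvRank_cons_self _ _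
        have hatl : a ∈ tl.map (fun p => p.1) := by
          rcases List.mem_cons.mp ha with h | h
          · exact absurd h.symm hna
          · exact h
        have hra : pvRank (n :: tl.map (fun p => p.1)) a = pvRank (tl.map (fun p => p.1)) a + 1 :=
          pvRank_cons_ne _ _ _ hna hatl
        have hge : 0 ≤ pvRank (tl.map (fun p => p.1)) a := (pvRank_nonneg_iff _ _).mpr hatl
        have : ¬ pvRank (n :: tl.map (fun p => p.1)) a ≤ pvRank (n :: tl.map (fun p => p.1)) n := by
          rw [hra, h0]; omega
        simp [pvScanFirst, this]
      · have hatl : a ∈ tl.map (fun p => p.1) := by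
          rcases List.mem_cons.mp ha with h | h
          · exact absurd h.symm hna
          · exact h
        have hstl : s ∈ tl.map (fun p => p.1) := by
          rcases List.mem_cons.mp hs with h | h
          · exact absurd h.symm hns
          · exact h
        have hra := pvRank_cons_ne n a (tl.map (fun p => p.1)) hna hatl
        have hrs := pvRank_cons_ne n s (tl.map (fun p => p.1)) hns hstl
        have hiff : (pvRank (n :: tl.map (fun p => p.1)) a ≤ pvRank (n :: tl.map (fun p => p.1)) s)
            ↔ (pvRank (tl.map (fun p => p.1)) a ≤ pvRank (tl.map (fun p => p.1)) s) := by
          rw [hra, hrs]; omega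
        have hrec := ih hatl hstl
        simp only [pvScanFirst, if_neg (by tauto : ¬ (n = a ∨ n = s))]
        rw [hrec]
        by_cases hle : pvRank (tl.map (fun p => p.1)) a ≤ pvRank (tl.map (fun p => p.1)) s
        · rw [if_pos (hiff.mpr hle), if_pos hle]
        · rw [if_neg (fun h => hle (hiff.mp h)), if_neg hle]

-- ===== VERDICT (by name: the statement is the Claim_ definition above) =====
theorem effective_cat_name_py_spec : Claim_equal_effective_cat_name_py := by
  intro auto_cat sel_cat categories _
  unfold Spec_effective_cat_name_py effective_cat_name_py effective_cat_name_py_alt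
  by_cases h1 : auto_cat.getD "" = ""
  · simp [h1]
  · by_cases h2 : sel_cat.getD "" = ""
    · simp [h1, h2]
    · simp only [h1, h2, if_false]
      set cats := pvCats categories with hcats
      set ns := cats.map (fun p => p.1) with hns
      set a := auto_cat.getD "" with haa
      set s := sel_cat.getD "" with hss
      have hmem : ∀ x : String, x ∈ PySem.Set.ofList ns ↔ x ∈ ns := by
        intro x; exact PySem.Set.mem_ofList ns x
      by_cases hA : a ∈ ns
      · by_cases hS : s ∈ ns
        · have := scan_eq_rank a s cats (hns ▸ hA) (hns ▸ hS)
          rw [← hns] at this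
          simp only [hmem, hA, hS, not_true, if_false, this]
          by_cases hle : pvRank ns a ≤ pvRank ns s
          · have : auto_cat = some a := by
              cases auto_cat with
              | none => simp [haa] at h1
              | some v => simp [haa]
            simp [hle, this]
          · have : sel_cat = some s := by
              cases sel_cat with
              | none => simp [hss] at h2
              | some v => simp [hss]
            simp [hle, this]
        · -- sel unknown: rank s = -1 < rank a ≥ 0 → A returns sel; B returns sel
          have hrs : pvRank ns s = -1 := (pvRank_neg_iff _ _).mpr hS
          have hra : 0 ≤ pvRank ns a := (pvRank_nonneg_iff _ _).mpr hA
          have : ¬ pvRank ns a ≤ pvRank ns s := by omega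
          simp [hmem, hA, hS, this]
      · -- auto unknown: rank a = -1 ≤ rank s → both return auto
        have hra : pvRank ns a = -1 := (pvRank_neg_iff _ _).mpr hA
        have hrs : -1 ≤ pvRank ns s := by
          unfold pvRank
          cases h : PySem.List.index? ns s with
          | none => simp
          | some k => simp
        have : pvRank ns a ≤ pvRank ns s := by omega
        simp [hmem, hA, this]
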